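-- pv_equiv track=rewrite | github.com/ahmadtara/tara-usti | kmz_dwg.py | classify_items
-- ===== SOURCE A (Python) =====
-- def classify_items(items):
--     classified = {name: [] for name in [
--         "FDT", "FAT", "HP_COVER", "HP_UNCOVER", "NEW_POLE", "EXISTING_POLE", "POLE",
--         "BOUNDARY", "DISTRIBUTION_CABLE", "SLING_WIRE", "KOTAK", "JALAN"
--     ]}
--     for it in items:
--         folder = it['folder']
--         if "FDT" in folder:
--             classified["FDT"].append(it)
--         elif "FAT" in folder and folder != "FAT AREA":
--             classified["FAT"].append(it)
--         elif "HP COVER" in folder: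
--             classified["HP_COVER"].append(it)
--         elif "HP UNCOVER" in folder:
--             classified["HP_UNCOVER"].append(it)
--         elif "NEW POLE" in folder:
--             classified["NEW_POLE"].append(it)
--         elif "EXISTING" in folder or "EMR" in folder:
--             classified["EXISTING_POLE"].append(it)
--         elif "BOUNDARY" in folder:
--             classified["BOUNDARY"].append(it)
--         elif "DISTRIBUTION CABLE" in folder:
--             classified["DISTRIBUTION_CABLE"].append(it)
--         elif "SLING WIRE" in folder:
--             classified["SLING_WIRE"].append(it)
--         elif "KOTAK" in folder:
--             classified["KOTAK"].append(it)
--         elif "JALAN" in folder: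
--             classified["JALAN"].append(it)
--         else:
--             classified["POLE"].append(it)
--     return classified
-- ===== SOURCE B (Python) =====
-- NAMES = [
--     "FDT", "FAT", "HP_COVER", "HP_UNCOVER", "NEW_POLE", "EXISTING_POLE", "POLE",
--     "BOUNDARY", "DISTRIBUTION_CABLE", "SLING_WIRE", "KOTAK", "JALAN"
-- ]
--
-- RULES = [
--     ("FDT", lambda f: "FDT" in f),
--     ("FAT", lambda f: "FAT" in f and f != "FAT AREA"),
--     ("HP_COVER", lambda f: "HP COVER" in f),
--     ("HP_UNCOVER", lambda f: "HP UNCOVER" in f),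
--     ("NEW_POLE", lambda f: "NEW POLE" in f),
--     ("EXISTING_POLE", lambda f: "EXISTING" in f or "EMR" in f),
--     ("BOUNDARY", lambda f: "BOUNDARY" in f),
--     ("DISTRIBUTION_CABLE", lambda f: "DISTRIBUTION CABLE" in f),
--     ("SLING_WIRE", lambda f: "SLING WIRE" in f),
--     ("KOTAK", lambda f: "KOTAK" in f),
--     ("JALAN", lambda f: "JALAN" in f),
-- ]
--
-- def _category(folder):
--     for name, pred in RULES:
--         if pred(folder):
--             return name
--     return "POLE"
--
-- def classify_items(items):
--     return {name: [it for it in items if _category(it['folder']) == name]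
--             for name in NAMES}
-- ===== Notes on version B (the rewrite author's own statement) =====
-- stated objective: alternative
-- what changed: Replaces the single-pass hardcoded elif chain that appends into a pre-built dict by a data-driven ordered rules table: a first-match category function over the rules plus a dict comprehension that filters the items once per category.
import Mathlib
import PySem

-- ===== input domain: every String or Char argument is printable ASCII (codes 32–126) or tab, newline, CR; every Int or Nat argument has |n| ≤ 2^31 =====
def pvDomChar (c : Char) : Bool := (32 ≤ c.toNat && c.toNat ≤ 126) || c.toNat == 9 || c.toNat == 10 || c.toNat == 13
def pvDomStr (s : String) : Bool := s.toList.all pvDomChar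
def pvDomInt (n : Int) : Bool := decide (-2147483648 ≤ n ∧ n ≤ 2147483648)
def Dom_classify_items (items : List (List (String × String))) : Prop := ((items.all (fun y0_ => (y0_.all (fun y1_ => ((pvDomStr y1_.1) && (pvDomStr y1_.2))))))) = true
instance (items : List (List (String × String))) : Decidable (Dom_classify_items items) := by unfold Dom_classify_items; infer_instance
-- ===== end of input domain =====

-- B replaces A's hardcoded elif chain by an ordered rules table (first-match category
-- function) plus a per-category filter; same results, alternative decomposition (not faster).

-- ===== PORT A =====
-- A builds a dict of 12 empty lists and, in one pass, appends each item to the first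
-- branch of an if/elif chain on its 'folder' string (fallback "POLE"); returns the dict.
def classify_items (items : List (List (String × String))) : List (String × List (List (String × String))) :=
  let classified : PySem.Dict String (List (List (String × String))) :=
    PySem.Dict.ofList ((["FDT", "FAT", "HP_COVER", "HP_UNCOVER", "NEW_POLE", "EXISTING_POLE", "POLE",
      "BOUNDARY", "DISTRIBUTION_CABLE", "SLING_WIRE", "KOTAK", "JALAN"]).map (fun name => (name, [])))
  (items.foldl (fun d it =>
    -- it['folder']: Pre_ guarantees the key is present, so getD "" is never the default
    let folder := ((PySem.Dict.mk it).get? "folder").getD ""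
    if PySem.Str.isIn "FDT" folder then d.modify "FDT" [] (· ++ [it])
    else if PySem.Str.isIn "FAT" folder && folder != "FAT AREA" then d.modify "FAT" [] (· ++ [it])
    else if PySem.Str.isIn "HP COVER" folder then d.modify "HP_COVER" [] (· ++ [it])
    else if PySem.Str.isIn "HP UNCOVER" folder then d.modify "HP_UNCOVER" [] (· ++ [it])
    else if PySem.Str.isIn "NEW POLE" folder then d.modify "NEW_POLE" [] (· ++ [it])
    else if PySem.Str.isIn "EXISTING" folder || PySem.Str.isIn "EMR" folder then d.modify "EXISTING_POLE" [] (· ++ [it])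
    else if PySem.Str.isIn "BOUNDARY" folder then d.modify "BOUNDARY" [] (· ++ [it])
    else if PySem.Str.isIn "DISTRIBUTION CABLE" folder then d.modify "DISTRIBUTION_CABLE" [] (· ++ [it])
    else if PySem.Str.isIn "SLING WIRE" folder then d.modify "SLING_WIRE" [] (· ++ [it])
    else if PySem.Str.isIn "KOTAK" folder then d.modify "KOTAK" [] (· ++ [it])
    else if PySem.Str.isIn "JALAN" folder then d.modify "JALAN" [] (· ++ [it])
    else d.modify "POLE" [] (· ++ [it])) classified).items

-- ===== PORT B =====
def pvNames : List String :=
  ["FDT", "FAT", "HP_COVER", "HP_UNCOVER", "NEW_POLE", "EXISTING_POLE", "POLE",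
   "BOUNDARY", "DISTRIBUTION_CABLE", "SLING_WIRE", "KOTAK", "JALAN"]

def pvRules : List (String × (String → Bool)) :=
  [("FDT", fun f => PySem.Str.isIn "FDT" f),
   ("FAT", fun f => PySem.Str.isIn "FAT" f && f != "FAT AREA"),
   ("HP_COVER", fun f => PySem.Str.isIn "HP COVER" f),
   ("HP_UNCOVER", fun f => PySem.Str.isIn "HP UNCOVER" f),
   ("NEW_POLE", fun f => PySem.Str.isIn "NEW POLE" f),
   ("EXISTING_POLE", fun f => PySem.Str.isIn "EXISTING" f || PySem.Str.isIn "EMR" f),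
   ("BOUNDARY", fun f => PySem.Str.isIn "BOUNDARY" f),
   ("DISTRIBUTION_CABLE", fun f => PySem.Str.isIn "DISTRIBUTION CABLE" f),
   ("SLING_WIRE", fun f => PySem.Str.isIn "SLING WIRE" f),
   ("KOTAK", fun f => PySem.Str.isIn "KOTAK" f),
   ("JALAN", fun f => PySem.Str.isIn "JALAN" f)]

-- _category: scan the rules, return the first matching name, fall back to "POLE"
def pvCategory : List (String × (String → Bool)) → String → String
  | [], _ => "POLE"
  | (name, pred) :: rest, f => if pred f then name else pvCategory rest f

def classify_items_alt (items : List (List (String × String))) : List (String × List (List (String × String))) :=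
  pvNames.map (fun name =>
    (name, items.filter (fun it =>
      pvCategory pvRules (((PySem.Dict.mk it).get? "folder").getD "") == name)))

-- ===== PRECONDITION & SPEC =====
-- Pre_ excludes items without a 'folder' key, on which Python A raises KeyError.
def Pre_classify_items (items : List (List (String × String))) : Prop :=
  ∀ it ∈ items, (PySem.Dict.mk it).contains "folder" = true
instance (items : List (List (String × String))) : Decidable (Pre_classify_items items) := by
  unfold Pre_classify_items; infer_instance

def pvWitness_classify_items : (List (List (String × String))) :=
  [[("folder", "FDT 01")], [("folder", "FAT AREA")], [("folder", "garden")]]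

def Spec_classify_items (items : List (List (String × String))) (out : List (String × List (List (String × String)))) : Prop := out = classify_items_alt items
instance (items : List (List (String × String))) (out : List (String × List (List (String × String)))) : Decidable (Spec_classify_items items out) := by unfold Spec_classify_items; infer_instance

-- ===== CLAIM (what is proved, stated in full; the proofs are below) =====
def Claim_equal_classify_items : Prop := ∀ (items : List (List (String × String))), Dom_classify_items items → Pre_classify_items items → Spec_classify_items items (classify_items items)

-- ===== LEMMAS AND PROOFS =====

-- the folder string A and B both read from an item
def pvFolder (it : List (String × String)) : String :=
  ((PySem.Dict.mk it).get? "folder").getD ""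

-- the initial dict A builds
def pvInit : PySem.Dict String (List (List (String × String))) :=
  PySem.Dict.ofList (pvNames.map (fun name => (name, [])))

-- B's first-match scan of the rules table, written out
lemma cat_eq (f : String) : pvCategory pvRules f =
  (if PySem.Str.isIn "FDT" f then "FDT"
   else if PySem.Str.isIn "FAT" f && f != "FAT AREA" then "FAT"
   else if PySem.Str.isIn "HP COVER" f then "HP_COVER"
   else if PySem.Str.isIn "HP UNCOVER" f then "HP_UNCOVER"
   else if PySem.Str.isIn "NEW POLE" f then "NEW_POLE"
   else if PySem.Str.isIn "EXISTING" f || PySem.Str.isIn "EMR" f then "EXISTING_POLE"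
   else if PySem.Str.isIn "BOUNDARY" f then "BOUNDARY"
   else if PySem.Str.isIn "DISTRIBUTION CABLE" f then "DISTRIBUTION_CABLE"
   else if PySem.Str.isIn "SLING WIRE" f then "SLING_WIRE"
   else if PySem.Str.isIn "KOTAK" f then "KOTAK"
   else if PySem.Str.isIn "JALAN" f then "JALAN"
   else "POLE") := rfl

lemma stepA_modify (d : PySem.Dict String (List (List (String × String)))) (it : List (String × String)) (F : String) :
    (if PySem.Str.isIn "FDT" F then d.modify "FDT" [] (· ++ [it])
     else if (PySem.Str.isIn "FAT" F && F != "FAT AREA") then d.modify "FAT" [] (· ++ [it])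
     else if PySem.Str.isIn "HP COVER" F then d.modify "HP_COVER" [] (· ++ [it])
     else if PySem.Str.isIn "HP UNCOVER" F then d.modify "HP_UNCOVER" [] (· ++ [it])
     else if PySem.Str.isIn "NEW POLE" F then d.modify "NEW_POLE" [] (· ++ [it])
     else if (PySem.Str.isIn "EXISTING" F || PySem.Str.isIn "EMR" F) then d.modify "EXISTING_POLE" [] (· ++ [it])
     else if PySem.Str.isIn "BOUNDARY" F then d.modify "BOUNDARY" [] (· ++ [it])
     else if PySem.Str.isIn "DISTRIBUTION CABLE" F then d.modify "DISTRIBUTION_CABLE" [] (· ++ [it])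
     else if PySem.Str.isIn "SLING WIRE" F then d.modify "SLING_WIRE" [] (· ++ [it])
     else if PySem.Str.isIn "KOTAK" F then d.modify "KOTAK" [] (· ++ [it])
     else if PySem.Str.isIn "JALAN" F then d.modify "JALAN" [] (· ++ [it])
     else d.modify "POLE" [] (· ++ [it]))
    = d.modify
    (if PySem.Str.isIn "FDT" F then "FDT"
     else if (PySem.Str.isIn "FAT" F && F != "FAT AREA") then "FAT"
     else if PySem.Str.isIn "HP COVER" F then "HP_COVER"
     else if PySem.Str.isIn "HP UNCOVER" F then "HP_UNCOVER"
     else if PySem.Str.isIn "NEW POLE" F then "NEW_POLE"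
     else if (PySem.Str.isIn "EXISTING" F || PySem.Str.isIn "EMR" F) then "EXISTING_POLE"
     else if PySem.Str.isIn "BOUNDARY" F then "BOUNDARY"
     else if PySem.Str.isIn "DISTRIBUTION CABLE" F then "DISTRIBUTION_CABLE"
     else if PySem.Str.isIn "SLING WIRE" F then "SLING_WIRE"
     else if PySem.Str.isIn "KOTAK" F then "KOTAK"
     else if PySem.Str.isIn "JALAN" F then "JALAN"
     else "POLE") [] (· ++ [it]) := by
  cases h0 : PySem.Str.isIn "FDT" F
  case false =>
    cases h1 : (PySem.Str.isIn "FAT" F && F != "FAT AREA")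
    case false =>
      cases h2 : PySem.Str.isIn "HP COVER" F
      case false =>
        cases h3 : PySem.Str.isIn "HP UNCOVER" F
        case false =>
          cases h4 : PySem.Str.isIn "NEW POLE" F
          case false =>
            cases h5 : (PySem.Str.isIn "EXISTING" F || PySem.Str.isIn "EMR" F)
            case false =>
              cases h6 : PySem.Str.isIn "BOUNDARY" F
              case false =>
                cases h7 : PySem.Str.isIn "DISTRIBUTION CABLE" F
                case false =>
                  cases h8 : PySem.Str.isIn "SLING WIRE" F
                  case false =>
                    cases h9 : PySem.Str.isIn "KOTAK" F
                    case false =>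
                      cases h10 : PySem.Str.isIn "JALAN" F
                      case false =>
                        rfl
                      case true => rfl
                    case true => rfl
                  case true => rfl
                case true => rfl
              case true => rfl
            case true => rfl
          case true => rfl
        case true => rfl
      case true => rfl
    case true => rfl
  case true => rfl

set_option maxHeartbeats 2000000 in
lemma cat_mem_names (f : String) : pvCategory pvRules f ∈ pvNames := by
  rw [cat_eq]; split_ifs <;> decide

lemma init_keys : pvInit.keys = pvNames := by decide

lemma keys_final (items : List (List (String × String))) :
    (items.foldl (fun d it => d.modify (pvCategory pvRules (pvFolder it)) [] (· ++ [it])) pvInit).keys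
      = pvNames := by
  rw [PySem.Dict.keys_foldl_modify_key items (fun it => pvCategory pvRules (pvFolder it)) []
        (fun _ it => (· ++ [it])) pvInit]
  rw [PySem.Set.update_eq_append_filter, init_keys]
  have h : List.filter (fun y => !PySem.Set.contains pvNames y)
      (PySem.Set.ofList (items.map (fun it => pvCategory pvRules (pvFolder it)))) = [] := by
    rw [List.filter_eq_nil_iff]
    intro y hy
    obtain ⟨it, -, rfl⟩ := List.mem_map.1 ((PySem.Set.mem_ofList _ _).1 hy)
    simp
    exact cat_mem_names (pvFolder it)
  rw [h, List.append_nil]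

lemma getD_final (items : List (List (String × String))) (c : String) :
    (items.foldl (fun d it => d.modify (pvCategory pvRules (pvFolder it)) [] (· ++ [it])) pvInit).getD c []
      = pvInit.getD c [] ++ items.filter (fun it => pvCategory pvRules (pvFolder it) == c) := by
  have hmap : items.foldl (fun d it => d.modify (pvCategory pvRules (pvFolder it)) [] (· ++ [it])) pvInit
      = (items.map (fun it => (pvCategory pvRules (pvFolder it), it))).foldl
          (fun d p => d.modify p.1 [] (· ++ [p.2])) pvInit := by
    rw [List.foldl_map]
  rw [hmap, PySem.Dict.getD_foldl_modify_append, List.filter_map]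
  simp [Function.comp_def]

set_option maxHeartbeats 2000000 in
theorem classify_eq (items : List (List (String × String))) :
    classify_items items = classify_items_alt items := by
  have hfold : classify_items items
      = (items.foldl (fun d it => d.modify (pvCategory pvRules (pvFolder it)) [] (· ++ [it])) pvInit).items := by
    simp only [classify_items]
    have hinit : PySem.Dict.ofList ((["FDT", "FAT", "HP_COVER", "HP_UNCOVER", "NEW_POLE", "EXISTING_POLE", "POLE",
        "BOUNDARY", "DISTRIBUTION_CABLE", "SLING_WIRE", "KOTAK", "JALAN"]).map
          (fun name => (name, ([] : List (List (String × String)))))) = pvInit := rfl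
    rw [hinit]
    refine congrArg PySem.Dict.items (PySem.List.foldl_congr_mem items _ _ _ ?_)
    intro d it _
    simp only [pvFolder]
    rw [cat_eq]
    exact stepA_modify d it _
  rw [hfold]
  have hnd : (items.foldl (fun d it => d.modify (pvCategory pvRules (pvFolder it)) [] (· ++ [it])) pvInit).keys.Nodup := by
    exact PySem.Dict.nodup_keys_foldl_modify_key items (fun it => pvCategory pvRules (pvFolder it)) []
      (fun _ it => (· ++ [it])) pvInit (by rw [init_keys]; decide)
  rw [PySem.Dict.items_eq_map_keys _ hnd [], keys_final items]
  unfold classify_items_alt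
  apply List.map_congr_left
  intro n hn
  rw [getD_final items n]
  have hi : pvInit.getD n [] = [] := by
    fin_cases hn <;> decide
  rw [hi, List.nil_append]
  rfl

-- ===== VERDICT (by name: the statement is the Claim_ definition above) =====
theorem classify_items_spec : Claim_equal_classify_items := by
  intro items _ _
  unfold Spec_classify_items
  exact classify_eq items
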